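-- pv_equiv track=rewrite | github.com/stobinaator/Advent-of-Code | 2017/day 1 captcha/joel_way.py | sum_matching_digits
-- ===== SOURCE A (Python) =====
-- def sum_matching_digits(s: str) -> int:
--     total = 0
--
--     for curr_val , next_val in zip(s, s[1:]):
--         if curr_val == next_val:
--             total += int(curr_val)
--
--     if s[0] == s[-1]:
--         total += int(s[0])
--
--     return total
-- ===== SOURCE B (Python) =====
-- from itertools import groupby
--
-- def sum_matching_digits(s: str) -> int:
--     # Run-length view: a maximal run of digit d with length k contains exactly
--     # k-1 adjacent matching pairs, contributing int(d) * (k - 1).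
--     total = 0
--     for d, g in groupby(s):
--         k = len(list(g))
--         if k > 1:
--             total += int(d) * (k - 1)
--     if s[-1] == s[0]:
--         total += int(s[0])
--     return total
-- ===== Notes on version B (the rewrite author's own statement) =====
-- stated objective: alternative
-- what changed: B computes a run-length encoding of the string (itertools.groupby) and adds int(d)*(k-1) per maximal run of length k, instead of A's scan over all adjacent character pairs; the wrap-around pair stays a separate check in both.
import Mathlib
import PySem

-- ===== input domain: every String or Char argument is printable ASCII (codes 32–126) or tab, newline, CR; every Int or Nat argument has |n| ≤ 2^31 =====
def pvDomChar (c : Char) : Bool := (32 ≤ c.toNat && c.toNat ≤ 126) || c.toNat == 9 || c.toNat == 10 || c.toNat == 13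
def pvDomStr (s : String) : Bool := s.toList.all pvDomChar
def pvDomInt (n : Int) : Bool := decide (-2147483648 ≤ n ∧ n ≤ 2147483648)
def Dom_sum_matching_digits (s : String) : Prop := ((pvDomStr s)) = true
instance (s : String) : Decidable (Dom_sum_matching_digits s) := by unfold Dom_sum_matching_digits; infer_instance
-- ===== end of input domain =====

-- B replaces A's scan over adjacent pairs by a run-length encoding: each maximal
-- run of digit d and length k contributes int(d)*(k-1) (alternative algorithm, same cost).

-- Python's int(c) on a single digit character; on a non-digit char Python raises
-- ValueError — those inputs are excluded by Pre_sum_matching_digits (exact on digits).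
def pvIntOfDigit (c : Char) : Int := ((c.toNat : Int) - 48)

-- ===== PORT A =====
-- total = 0; for curr,next in zip(s, s[1:]): if curr==next: total += int(curr);
-- if s[0]==s[-1]: total += int(s[0])  (s[0]/s[-1] raise IndexError on "", excluded by Pre_)
def sum_matching_digits (s : String) : Int :=
  let l := s.toList
  let total := (l.zip (l.drop 1)).foldl
    (fun t p => if p.1 = p.2 then t + pvIntOfDigit p.1 else t) 0
  match PySem.List.pyGet? l 0, PySem.List.pyGet? l (-1) with
  | some a, some b => if a = b then total + pvIntOfDigit a else total
  | _, _ => total  -- unreachable under Pre_ (Python raises IndexError on empty s)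

-- ===== PORT B =====
-- B's own int(c) on a digit char (kept separate from A's helper)
def pvIntOfDigitB (c : Char) : Int := ((c.toNat : Int) - 48)

-- port of itertools.groupby over characters: the list of (key, run length) of maximal runs
def pvRuns : List Char → List (Char × Nat)
  | [] => []
  | a :: l =>
    match pvRuns l with
    | (b, k) :: rest => if a = b then (a, k + 1) :: rest else (a, 1) :: (b, k) :: rest
    | [] => [(a, 1)]

-- total = 0; for d,g in groupby(s): k = len(list(g)); if k > 1: total += int(d)*(k-1);
-- if s[-1] == s[0]: total += int(s[0])
def sum_matching_digits_alt (s : String) : Int :=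
  let l := s.toList
  let total := (pvRuns l).foldl
    (fun t p => if 1 < p.2 then t + pvIntOfDigitB p.1 * ((p.2 : Int) - 1) else t) 0
  match PySem.List.pyGet? l (-1) with
  | none => total  -- unreachable under Pre_ (s[-1] raises IndexError on empty s)
  | some b =>
    match PySem.List.pyGet? l 0 with
    | none => total
    | some a => if b = a then total + pvIntOfDigitB a else total

-- ===== PRECONDITION & SPEC =====
-- Pre_ excludes exactly the inputs where A raises: the empty string (IndexError)
-- and strings where some circularly-adjacent equal pair is a non-digit (ValueError from int()).
def Pre_sum_matching_digits (s : String) : Prop :=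
  s.toList ≠ [] ∧ ∀ p ∈ s.toList.zip (s.toList.rotate 1), p.1 = p.2 → p.1.isDigit
instance (s : String) : Decidable (Pre_sum_matching_digits s) := by
  unfold Pre_sum_matching_digits; infer_instance
def pvWitness_sum_matching_digits : String := "91212129"

def Spec_sum_matching_digits (s : String) (out : Int) : Prop := out = sum_matching_digits_alt s
instance (s : String) (out : Int) : Decidable (Spec_sum_matching_digits s out) := by
  unfold Spec_sum_matching_digits; infer_instance

-- ===== CLAIM (what is proved, stated in full; the proofs are below) =====
def Claim_equal_sum_matching_digits : Prop := ∀ (s : String), Dom_sum_matching_digits s → Pre_sum_matching_digits s → Spec_sum_matching_digits s (sum_matching_digits s)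

-- ===== LEMMAS AND PROOFS =====

-- adjacency sum, recursive form of A's loop
def pvAdj : List Char → Int
  | a :: b :: rest => (if a = b then pvIntOfDigit a else 0) + pvAdj (b :: rest)
  | _ => 0

-- run sum, recursive form of B's loop
def pvRunSum : List (Char × Nat) → Int
  | [] => 0
  | p :: rest => (if 1 < p.2 then pvIntOfDigit p.1 * ((p.2 : Int) - 1) else 0) + pvRunSum rest

theorem pvIntOfDigitB_eq : pvIntOfDigitB = pvIntOfDigit := rfl

theorem pvRuns_cons (a : Char) (l : List Char) :
    pvRuns (a :: l) = match pvRuns l with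
      | (b, k) :: rest => if a = b then (a, k + 1) :: rest else (a, 1) :: (b, k) :: rest
      | [] => [(a, 1)] := rfl

theorem pv_foldA (l : List Char) (t : Int) :
    (l.zip (l.drop 1)).foldl (fun t p => if p.1 = p.2 then t + pvIntOfDigit p.1 else t) t
      = t + pvAdj l := by
  induction l generalizing t with
  | nil => simp [pvAdj]
  | cons a l ih =>
    cases l with
    | nil => simp [pvAdj]
    | cons b rest =>
      simp only [List.drop_one, List.tail_cons, List.zip_cons_cons, List.foldl_cons]
      have := ih (t := if a = b then t + pvIntOfDigit a else t)
      simp only [List.drop_one, List.tail_cons] at this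
      rw [this, pvAdj]
      split <;> ring

theorem pv_foldB (rl : List (Char × Nat)) (t : Int) :
    rl.foldl (fun t p => if 1 < p.2 then t + pvIntOfDigit p.1 * ((p.2 : Int) - 1) else t) t
      = t + pvRunSum rl := by
  induction rl generalizing t with
  | nil => simp [pvRunSum]
  | cons p rest ih =>
    simp only [List.foldl_cons, pvRunSum]
    rw [ih]
    split <;> ring

theorem pv_runs_head (b : Char) (rest : List Char) :
    ∃ k rl, pvRuns (b :: rest) = (b, k) :: rl ∧ 1 ≤ k := by
  induction rest generalizing b with
  | nil => exact ⟨1, [], rfl, le_refl 1⟩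
  | cons c rest ih =>
    obtain ⟨k, rl, h, hk⟩ := ih c
    by_cases hbc : b = c
    · refine ⟨k + 1, rl, ?_, by omega⟩
      rw [pvRuns_cons, h]
      simp [hbc]
    · refine ⟨1, (c, k) :: rl, ?_, le_refl 1⟩
      rw [pvRuns_cons, h]
      simp [hbc]

theorem pv_adj_eq_runsum (l : List Char) : pvAdj l = pvRunSum (pvRuns l) := by
  induction l with
  | nil => simp [pvAdj, pvRuns, pvRunSum]
  | cons a l ih =>
    cases l with
    | nil => simp [pvAdj, pvRuns, pvRunSum]
    | cons b rest =>
      obtain ⟨k, rl, h, hk⟩ := pv_runs_head b rest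
      rw [pvAdj, ih, h, pvRuns_cons, h]
      by_cases hab : a = b
      · subst hab
        simp only [if_true, pvRunSum]
        rw [if_pos (by omega : (1 : Nat) < k + 1)]
        by_cases hk1 : 1 < k
        · rw [if_pos hk1]
          push_cast
          ring
        · have hk0 : k = 1 := by omega
          subst hk0
          norm_num
      · simp only [if_neg hab, pvRunSum]
        norm_num

theorem sum_matching_digits_eq (s : String) (h : s.toList ≠ []) :
    sum_matching_digits s = sum_matching_digits_alt s := by
  obtain ⟨a, l, hl⟩ : ∃ a l, s.toList = a :: l := by
    cases hs : s.toList with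
    | nil => exact absurd hs h
    | cons a l => exact ⟨a, l, rfl⟩
  unfold sum_matching_digits sum_matching_digits_alt
  simp only [hl, pvIntOfDigitB_eq]
  have h0 : PySem.List.pyGet? (a :: l) 0 = some a := by
    simp [PySem.List.pyGet?, PySem.List.pyIdx?]
  have hm1 : PySem.List.pyGet? (a :: l) (-1) = some ((a :: l).getLast (by simp)) := by
    simp [PySem.List.pyGet?, PySem.List.pyIdx?]
    rw [List.getLast_eq_getElem]
    simp
    rfl
  rw [h0, hm1, pv_foldA, pv_foldB, pv_adj_eq_runsum]
  show (if a = (a :: l).getLast (by simp) then 0 + pvRunSum (pvRuns (a :: l)) + pvIntOfDigit a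
        else 0 + pvRunSum (pvRuns (a :: l)))
     = (if (a :: l).getLast (by simp) = a then 0 + pvRunSum (pvRuns (a :: l)) + pvIntOfDigit a
        else 0 + pvRunSum (pvRuns (a :: l)))
  by_cases hab : a = (a :: l).getLast (by simp)
  · rw [if_pos hab, if_pos hab.symm]
  · rw [if_neg hab, if_neg fun hc => hab hc.symm]

-- ===== VERDICT (by name: the statement is the Claim_ definition above) =====
theorem sum_matching_digits_spec : Claim_equal_sum_matching_digits := by
  intro s _ hpre
  unfold Spec_sum_matching_digits
  exact sum_matching_digits_eq s hpre.1
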